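-- pv_equiv track=rewrite | github.com/dominikjessen/advent-of-code | 2023/day9/day9.py | extrapolate_history_end
-- ===== SOURCE A (Python) =====
-- from typing import List
--
-- def extrapolate_history_end(history: List[List[int]]) -> List[List[int]]:
--   extrapolated = history[:]
--   n = len(extrapolated)-1
--   while n >= 0:
--     if n == len(extrapolated)-1:
--       extrapolated[n] = extrapolated[n] + [0]
--     else:
--       nextVal = extrapolated[n+1][-1] + extrapolated[n][-1]
--       extrapolated[n] = extrapolated[n] + [nextVal]
--     n -= 1
--
--   return extrapolated
-- ===== SOURCE B (Python) =====
-- from typing import List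
--
-- def extrapolate_history_end(history: List[List[int]]) -> List[List[int]]:
--   lasts = [row[-1] for row in history[:-1]]
--   vals = [sum(lasts[i:]) for i in range(len(history))]
--   return [row + [v] for row, v in zip(history, vals)]
-- ===== Notes on version B (the rewrite author's own statement) =====
-- stated objective: alternative
-- what changed: A mutates a copied list in a single backward while loop over indices, each row reading the previously rewritten row below it; B has no backward pass and no running state: it first collects the last element of every row but the bottom, then computes each appended value independently as an explicit suffix sum of that list, and finally zips rows with their values.
import Mathlib
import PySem

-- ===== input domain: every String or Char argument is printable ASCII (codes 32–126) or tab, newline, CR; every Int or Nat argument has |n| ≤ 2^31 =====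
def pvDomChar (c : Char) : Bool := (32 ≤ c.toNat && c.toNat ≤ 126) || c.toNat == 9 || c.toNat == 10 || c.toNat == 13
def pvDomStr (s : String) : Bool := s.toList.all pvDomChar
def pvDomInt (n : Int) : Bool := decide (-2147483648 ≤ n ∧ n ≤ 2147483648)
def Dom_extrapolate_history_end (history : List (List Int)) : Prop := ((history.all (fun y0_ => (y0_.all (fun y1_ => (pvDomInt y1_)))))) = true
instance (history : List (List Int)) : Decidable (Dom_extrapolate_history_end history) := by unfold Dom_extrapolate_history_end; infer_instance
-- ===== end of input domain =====

-- B replaces A's in-place top-down while loop by three staged passes (collect last elements,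
-- compute each appended value as an explicit suffix sum, zip rows with values); objective: alternative.

-- ===== PORT A =====
-- row[-1] with default 0: inside Pre_ the accessed rows are nonempty, so the default is never the result
def pvLastD (r : List Int) : Int := r.getLast?.getD 0

-- the while loop: fuel k means the current index is n = k-1; stops when n < 0
def aLoop (ext : List (List Int)) : Nat → List (List Int)
  | 0 => ext
  | Nat.succ m =>
    let ext' :=
      if m = ext.length - 1 then
        ext.set m ((ext.getD m []) ++ [(0 : Int)])
      else
        let nextVal := pvLastD (ext.getD (m+1) []) + pvLastD (ext.getD m [])
        ext.set m ((ext.getD m []) ++ [nextVal])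
    aLoop ext' m

def extrapolate_history_end (history : List (List Int)) : List (List Int) :=
  aLoop history history.length

-- ===== PORT B =====
-- lasts = [row[-1] for row in history[:-1]]; vals = [sum(lasts[i:]) for i in range(len(history))];
-- return [row + [v] for row, v in zip(history, vals)]
def extrapolate_history_end_alt (history : List (List Int)) : List (List Int) :=
  let lasts := history.dropLast.map pvLastD
  let vals := (List.range history.length).map (fun i => (lasts.drop i).sum)
  (history.zip vals).map (fun p => p.1 ++ [p.2])

-- ===== PRECONDITION & SPEC =====
-- Pre_ excludes exactly the inputs where Python A raises IndexError: a row other than the last being empty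
-- (its [-1] is read). Both Pythons raise there; Pre_ excludes no input on which A returns.
def Pre_extrapolate_history_end (history : List (List Int)) : Prop :=
  ∀ r ∈ history.dropLast, r ≠ []
instance (history : List (List Int)) : Decidable (Pre_extrapolate_history_end history) := by
  unfold Pre_extrapolate_history_end; infer_instance
def pvWitness_extrapolate_history_end : List (List Int) := [[0, 3, 6, 9], [3, 3, 3], [0, 0]]

def Spec_extrapolate_history_end (history : List (List Int)) (out : List (List Int)) : Prop := out = extrapolate_history_end_alt history
instance (history : List (List Int)) (out : List (List Int)) : Decidable (Spec_extrapolate_history_end history out) := by unfold Spec_extrapolate_history_end; infer_instance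

-- ===== CLAIM (what is proved, stated in full; the proofs are below) =====
def Claim_equal_extrapolate_history_end : Prop := ∀ (history : List (List Int)), Dom_extrapolate_history_end history → Pre_extrapolate_history_end history → Spec_extrapolate_history_end history (extrapolate_history_end history)

-- ===== LEMMAS AND PROOFS =====

-- reference characterisation: each row gets appended the sum of the last elements of the rows
-- strictly below it except the bottom one (0 for the bottom row)
def pvTailSum (l : List (List Int)) : Int := (l.dropLast.map pvLastD).sum

def pvF : List (List Int) → List (List Int)
  | [] => []
  | r :: rs => (r ++ [pvTailSum (r :: rs)]) :: pvF rs

theorem pvTailSum_cons (x : List Int) (l : List (List Int)) (h : l ≠ []) :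
    pvTailSum (x :: l) = pvLastD x + pvTailSum l := by
  unfold pvTailSum
  rw [List.dropLast_cons_of_ne_nil h]
  simp

theorem pvLastD_append (r : List Int) (v : Int) : pvLastD (r ++ [v]) = v := by
  simp [pvLastD]

-- B's three staged passes, with the lasts list generalized so induction goes through
def bZip (lasts : List Int) (h : List (List Int)) : List (List Int) :=
  (h.zip ((List.range h.length).map (fun i => (lasts.drop i).sum))).map (fun p => p.1 ++ [p.2])

theorem bZip_cons (lasts : List Int) (r : List Int) (rs : List (List Int)) :
    bZip lasts (r :: rs) = (r ++ [lasts.sum]) :: bZip lasts.tail rs := by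
  unfold bZip
  simp only [List.length_cons, List.range_succ_eq_map, List.map_cons, List.map_map,
    List.zip_cons_cons, List.drop_zero, List.cons.injEq, true_and]
  congr 2
  apply List.map_congr_left
  intro i _
  have hdrop : List.drop (i + 1) lasts = List.drop i lasts.tail := by
    cases lasts <;> simp
  show (List.drop (i+1) lasts).sum = (List.drop i lasts.tail).sum
  rw [hdrop]

theorem bZip_eq_pvF : ∀ (h : List (List Int)), bZip (h.dropLast.map pvLastD) h = pvF h := by
  intro h
  induction h with
  | nil => rfl
  | cons r rs ih =>
    cases rs with
    | nil => simp [bZip, pvF, pvTailSum]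
    | cons s t =>
      have hne : (s :: t : List (List Int)) ≠ [] := by simp
      rw [List.dropLast_cons_of_ne_nil hne, List.map_cons, bZip_cons, List.tail_cons, ih]
      conv_rhs => rw [pvF]
      have hhd : pvTailSum (r :: s :: t) = (pvLastD r :: List.map pvLastD (s :: t).dropLast).sum := by
        simp [pvTailSum, List.dropLast_cons_of_ne_nil hne]
      rw [hhd]

theorem alt_eq_pvF (h : List (List Int)) : extrapolate_history_end_alt h = pvF h := by
  have := bZip_eq_pvF h
  simpa [extrapolate_history_end_alt, bZip] using this

theorem aLoop_step (p : List (List Int)) (x : List Int) (suf : List (List Int)) :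
    aLoop ((p ++ [x]) ++ pvF suf) (p ++ [x]).length = aLoop (p ++ pvF (x :: suf)) p.length := by
  have hlen : (p ++ [x]).length = p.length + 1 := by simp
  rw [hlen]
  show aLoop ((p ++ [x]) ++ pvF suf) (Nat.succ p.length) = _
  rw [aLoop]
  have hgetx : ((p ++ [x]) ++ pvF suf).getD p.length [] = x := by
    rw [List.append_assoc]
    simp [List.getD, List.getElem?_append_right (Nat.le_refl p.length)]
  cases suf with
  | nil =>
    have hcond : p.length = ((p ++ [x]) ++ pvF ([] : List (List Int))).length - 1 := by
      simp [pvF]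
    rw [if_pos hcond, hgetx]
    have hset : ((p ++ [x]) ++ pvF ([] : List (List Int))).set p.length (x ++ [(0:Int)])
        = p ++ pvF [x] := by
      simp only [pvF, List.append_nil]
      rw [List.set_append_right _ _ (Nat.le_refl p.length)]
      simp [pvTailSum]
    rw [hset]
  | cons s t =>
    have hne : pvF (s :: t) ≠ [] := by simp [pvF]
    have hcond : ¬ p.length = ((p ++ [x]) ++ pvF (s :: t)).length - 1 := by
      simp only [List.length_append, List.length_cons, pvF, List.length]
      omega
    rw [if_neg hcond, hgetx]
    have hget1 : ((p ++ [x]) ++ pvF (s :: t)).getD (p.length + 1) [] = s ++ [pvTailSum (s :: t)] := by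
      rw [List.append_assoc]
      simp [List.getD, List.getElem?_append_right (by simp : p.length ≤ p.length + 1), pvF]
    rw [hget1, pvLastD_append]
    have hval : pvTailSum (s :: t) + pvLastD x = pvTailSum (x :: s :: t) := by
      rw [pvTailSum_cons x (s :: t) (by simp)]; ring
    have hset : ((p ++ [x]) ++ pvF (s :: t)).set p.length (x ++ [pvTailSum (s :: t) + pvLastD x])
        = p ++ pvF (x :: s :: t) := by
      rw [List.append_assoc, List.set_append_right _ _ (Nat.le_refl p.length)]
      simp only [Nat.sub_self, List.singleton_append, List.set_cons_zero, pvF]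
      rw [hval]
    rw [hset]

theorem aLoop_eq (pre : List (List Int)) :
    ∀ (suf : List (List Int)), aLoop (pre ++ pvF suf) pre.length = pvF (pre ++ suf) := by
  induction pre using List.reverseRecOn with
  | nil => intro suf; simp [aLoop]
  | append_singleton p x ih =>
    intro suf
    rw [aLoop_step, ih (x :: suf)]
    simp

theorem a_eq_pvF (h : List (List Int)) : extrapolate_history_end h = pvF h := by
  have := aLoop_eq h []
  simpa [extrapolate_history_end, pvF] using this

-- ===== VERDICT (by name: the statement is the Claim_ definition above) =====
theorem extrapolate_history_end_spec : Claim_equal_extrapolate_history_end := by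
  intro history _ _
  unfold Spec_extrapolate_history_end
  rw [a_eq_pvF, alt_eq_pvF]
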